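-- pv_equiv track=rewrite | github.com/jlib245/AlgorithmStudy | 프로그래머스/0/120869. 외계어 사전/외계어 사전.py | solution
-- ===== SOURCE A (Python) =====
-- def solution(spell, dic):
--     for word in dic:
--         a = 0
--         for spelling in spell:
--             if spelling in word:
--                 a += 1
--         if a == len(spell):
--             return 1
--
--     return 2
--
--
--
--
--     return answer
-- ===== SOURCE B (Python) =====
-- def solution(spell, dic):
--     candidates = dic
--     for s in spell:
--         candidates = [w for w in candidates if s in w]
--     return 1 if candidates else 2
-- ===== Notes on version B (the rewrite author's own statement) =====
-- stated objective: faster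
-- what changed: Inverts the loop nesting: instead of scanning each word and counting matched letters against len(spell), B filters the dictionary by each spell letter in successive passes and answers 1 iff any candidate survives; the candidate list shrinks sharply after early passes.
import Mathlib
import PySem

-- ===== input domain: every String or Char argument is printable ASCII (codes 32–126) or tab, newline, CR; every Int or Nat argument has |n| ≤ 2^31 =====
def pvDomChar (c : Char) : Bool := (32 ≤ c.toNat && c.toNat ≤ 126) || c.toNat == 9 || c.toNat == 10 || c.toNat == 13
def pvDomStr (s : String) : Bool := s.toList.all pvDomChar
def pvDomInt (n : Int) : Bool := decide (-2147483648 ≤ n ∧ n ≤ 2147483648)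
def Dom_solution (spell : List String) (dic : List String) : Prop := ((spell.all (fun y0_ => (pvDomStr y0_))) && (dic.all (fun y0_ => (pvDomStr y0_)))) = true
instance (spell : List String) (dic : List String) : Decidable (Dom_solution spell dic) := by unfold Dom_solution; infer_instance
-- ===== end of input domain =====

-- B inverts the loop nesting: it filters the dictionary by each spell letter in successive
-- passes and answers 1 iff some candidate survives; measurably faster since each pass shrinks the candidate list.

-- ===== PORT A =====
-- for word in dic: count spell entries contained in word; return 1 on full count, else keep scanning; 2 at the end
def solution (spell : List String) (dic : List String) : Int :=
  match dic with
  | [] => 2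
  | word :: rest =>
    let a : Int := spell.foldl (fun a spelling => if PySem.Str.isIn spelling word then a + 1 else a) 0
    if a = (spell.length : Int) then 1 else solution spell rest

-- ===== PORT B =====
-- candidates = dic; for s in spell: candidates = [w for w in candidates if s in w]; 1 if candidates else 2
def solution_alt (spell : List String) (dic : List String) : Int :=
  let candidates := spell.foldl (fun c s => c.filter (fun w => PySem.Str.isIn s w)) dic
  if candidates.isEmpty then 2 else 1

-- ===== PRECONDITION & SPEC =====
def Spec_solution (spell : List String) (dic : List String) (out : Int) : Prop := out = solution_alt spell dic
instance (spell : List String) (dic : List String) (out : Int) : Decidable (Spec_solution spell dic out) := by unfold Spec_solution; infer_instance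

-- ===== CLAIM (what is proved, stated in full; the proofs are below) =====
def Claim_equal_solution : Prop := ∀ (spell : List String) (dic : List String), Dom_solution spell dic → Spec_solution spell dic (solution spell dic)

-- ===== LEMMAS AND PROOFS =====

theorem foldl_if_count {α : Type} (p : α → Bool) (l : List α) (a : Int) :
    l.foldl (fun a x => if p x then a + 1 else a) a = a + (l.countP p : Int) := by
  induction l generalizing a with
  | nil => simp
  | cons x t ih =>
    simp only [List.foldl_cons, List.countP_cons]
    by_cases h : p x = true
    · simp only [h, if_true, ih]; push_cast; ring
    · simp only [h, ih]; push_cast; ring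

theorem count_eq_len_iff_all {α : Type} (p : α → Bool) (l : List α) :
    ((l.countP p : Int) = (l.length : Int)) ↔ l.all p = true := by
  rw [Int.natCast_inj]
  simp [List.countP_eq_length, List.all_eq_true]

-- staged filtering over spell equals one filter with the conjunction of all tests
theorem foldl_filter_eq (p : String → String → Bool) (spell : List String) (dic : List String) :
    spell.foldl (fun c s => c.filter (fun w => p s w)) dic
      = dic.filter (fun w => spell.all (fun s => p s w)) := by
  induction spell generalizing dic with
  | nil => simp
  | cons s t ih =>
    simp only [List.foldl_cons, ih, List.filter_filter, List.all_cons]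
    congr 1
    funext w
    rw [Bool.and_comm]

theorem filter_isEmpty_eq_not_any {α : Type} (p : α → Bool) (l : List α) :
    (l.filter p).isEmpty = !l.any p := by
  induction l with
  | nil => rfl
  | cons x t ih => by_cases h : p x = true <;> simp [h, ih]

theorem solution_eq_any (spell : List String) (dic : List String) :
    solution spell dic
      = if dic.any (fun w => spell.all (fun s => PySem.Str.isIn s w)) then 1 else 2 := by
  induction dic with
  | nil => simp [solution]
  | cons w rest ih =>
    simp only [solution, foldl_if_count, Int.zero_add, count_eq_len_iff_all, List.any_cons]
    by_cases h : spell.all (fun s => PySem.Str.isIn s w) = true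
    · simp only [h, Bool.true_or]
      simp
    · have h' : (spell.all fun s => PySem.Str.isIn s w) = false := by simpa using h
      simp only [h', Bool.false_or, ih]
      simp

theorem solution_eq_alt (spell : List String) (dic : List String) :
    solution spell dic = solution_alt spell dic := by
  rw [solution_eq_any]
  simp only [solution_alt, foldl_filter_eq, filter_isEmpty_eq_not_any]
  cases h : dic.any (fun w => spell.all (fun s => PySem.Str.isIn s w)) with
  | true => simp
  | false => simp

-- ===== VERDICT (by name: the statement is the Claim_ definition above) =====
theorem solution_spec : Claim_equal_solution := by
  intro spell dic _
  exact solution_eq_alt spell dic
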